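-- pv_equiv track=rewrite | github.com/miliar/Code_Jam_Webscraper | solutions_python/Problem_178/2560.py | solve
-- ===== SOURCE A (Python) =====
-- def solve(s):
--     s = minify(s)
--     prev = -1
--     count = 0
--     for i in range(len(s)):
--         if s[i] == '+':
--             prev = i
--             continue
--         if s[i] == '-':
--             if prev != -1:
--                 if s[prev] == '+':
--                     count += 2
--             else:
--                 count += 1
--     return str(count)
--
-- def minify(s):
--     ret = s[0]
--     count = 0
--     for i in range(len(s)):
--         if s[i] == ret[count]:
--             continue
--         ret += s[i]
--         count += 1
--     return ret
-- ===== SOURCE B (Python) =====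
-- def solve(s):
--     # single pass: skip run-repeats, count '-' runs (2 if a '+' run was seen before, else 1)
--     count = 0
--     seen_plus = False
--     last = None
--     for c in s:
--         if c == last:
--             continue
--         last = c
--         if c == '+':
--             seen_plus = True
--         elif c == '-':
--             count += 2 if seen_plus else 1
--     return str(count)
-- ===== Notes on version B (the rewrite author's own statement) =====
-- stated objective: faster
-- what changed: B is one pass over the raw string with a last-char/seen-plus state, eliminating A's intermediate minified string (built by quadratic repeated concatenation) and the prev-index bookkeeping (s[prev]=='+' is always true, so it becomes a boolean).
import Mathlib
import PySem

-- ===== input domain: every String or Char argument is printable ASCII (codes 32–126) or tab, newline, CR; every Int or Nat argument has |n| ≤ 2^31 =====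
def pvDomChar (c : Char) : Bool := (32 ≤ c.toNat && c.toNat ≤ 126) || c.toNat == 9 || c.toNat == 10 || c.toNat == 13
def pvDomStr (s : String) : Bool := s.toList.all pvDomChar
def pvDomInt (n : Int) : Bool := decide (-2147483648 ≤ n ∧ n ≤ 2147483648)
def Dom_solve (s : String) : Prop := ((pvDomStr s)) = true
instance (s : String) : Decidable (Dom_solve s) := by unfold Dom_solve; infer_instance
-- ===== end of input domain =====

-- B is one pass over the raw string (last-char skip + seen-plus flag), eliminating A's
-- intermediate minified string and the prev-index bookkeeping.

-- ===== PORT A =====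
-- minify: ret = s[0]; for i in range(len(s)): if s[i]==ret[count]: continue; ret += s[i]; count += 1
def pyMinify (l : List Char) : List Char :=
  ((List.range l.length).foldl
      (fun (st : List Char × Int) (i : Nat) =>
        if PySem.List.pyGet? l (i : Int) = PySem.List.pyGet? st.1 st.2 then st
        else (st.1 ++ (PySem.List.pyGet? l (i : Int)).toList, st.2 + 1))
      ((PySem.List.pyGet? l 0).toList, 0)).1   -- s[0]: IndexError (none) on [] is excluded by Pre_

def solve (s : String) : String :=
  PySem.Int.toStr
    (((List.range (pyMinify s.toList).length).foldl
        (fun (st : Int × Int) (i : Nat) =>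
          if PySem.List.pyGet? (pyMinify s.toList) (i : Int) = some '+' then ((i : Int), st.2)
          else if PySem.List.pyGet? (pyMinify s.toList) (i : Int) = some '-' then
            (if st.1 ≠ -1 then
              (if PySem.List.pyGet? (pyMinify s.toList) st.1 = some '+' then (st.1, st.2 + 2) else st)
             else (st.1, st.2 + 1))
          else st)
        ((-1 : Int), (0 : Int))).2)

-- ===== PORT B =====
def solve_alt (s : String) : String :=
  PySem.Int.toStr
    ((s.toList.foldl
        (fun (st : Int × Bool × Option Char) (c : Char) =>
          if some c = st.2.2 then st
          else if c = '+' then (st.1, true, some c)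
          else if c = '-' then (st.1 + (if st.2.1 then 2 else 1), st.2.1, some c)
          else (st.1, st.2.1, some c))
        ((0 : Int), false, none)).1)

-- ===== PRECONDITION & SPEC =====
-- Pre_ excludes exactly the empty string, on which A raises IndexError (minify's s[0]).
def Pre_solve (s : String) : Prop := s ≠ ""
instance (s : String) : Decidable (Pre_solve s) := by unfold Pre_solve; infer_instance
def pvWitness_solve : String := ("+-+")

def Spec_solve (s : String) (out : String) : Prop := out = solve_alt s
instance (s : String) (out : String) : Decidable (Spec_solve s out) := by unfold Spec_solve; infer_instance

-- ===== CLAIM (what is proved, stated in full; the proofs are below) =====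
def Claim_equal_solve : Prop := ∀ (s : String), Dom_solve s → Pre_solve s → Spec_solve s (solve s)

-- ===== LEMMAS AND PROOFS =====

-- adjacent run-collapse relative to the last-emitted character
def ddl (last : Option Char) : List Char → List Char
  | [] => []
  | c :: t => if some c = last then ddl last t else c :: ddl (some c) t

-- last emitted char after processing l starting from `last`
def le' (last : Option Char) : List Char → Option Char
  | [] => last
  | c :: t => if some c = last then le' last t else le' (some c) t

-- the counting step both programs implement on the collapsed sequence
def gstep (st : Bool × Int) (c : Char) : Bool × Int :=
  if c = '+' then (true, st.2)
  else if c = '-' then (st.1, st.2 + (if st.1 then 2 else 1))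
  else st

-- names for A's main loop (definitionally the fold inside `solve`)
def astep (m : List Char) (st : Int × Int) (i : Nat) : Int × Int :=
  if PySem.List.pyGet? m (i : Int) = some '+' then ((i : Int), st.2)
  else if PySem.List.pyGet? m (i : Int) = some '-' then
    (if st.1 ≠ -1 then
      (if PySem.List.pyGet? m st.1 = some '+' then (st.1, st.2 + 2) else st)
     else (st.1, st.2 + 1))
  else st

def afold (m : List Char) (n : Nat) : Int × Int :=
  (List.range n).foldl (astep m) ((-1 : Int), (0 : Int))

def gfold (m : List Char) (n : Nat) : Bool × Int := (m.take n).foldl gstep (false, 0)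

theorem le'_of_ddl_nil : ∀ (l : List Char) (last : Option Char), ddl last l = [] → le' last l = last := by
  intro l
  induction l with
  | nil => intro last _; rfl
  | cons c t ih =>
    intro last h
    by_cases hc : some c = last
    · simp only [ddl, if_pos hc] at h
      simp only [le', if_pos hc]
      exact ih last h
    · simp [ddl, if_neg hc] at h

theorem getLast?_ddl : ∀ (l : List Char) (last : Option Char), ddl last l ≠ [] → (ddl last l).getLast? = le' last l := by
  intro l
  induction l with
  | nil => intro last h; exact absurd rfl h
  | cons c t ih =>
    intro last h
    by_cases hc : some c = last
    · simp only [ddl, if_pos hc] at h ⊢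
      simp only [le', if_pos hc]
      exact ih last h
    · simp only [ddl, if_neg hc, le']
      cases hd : ddl (some c) t with
      | nil => simp [le'_of_ddl_nil t (some c) hd]
      | cons x xs =>
        rw [List.getLast?_cons_cons]
        rw [← hd, ih (some c) (by rw [hd]; exact List.cons_ne_nil x xs)]

theorem ddl_snoc (l : List Char) (last : Option Char) (c : Char) :
    ddl last (l ++ [c]) =
      if some c = le' last l then ddl last l else ddl last l ++ [c] := by
  induction l generalizing last with
  | nil => simp [ddl, le']
  | cons a t ih =>
    by_cases h : some a = last
    · simp only [List.cons_append, ddl, le', if_pos h]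
      exact ih last
    · simp only [List.cons_append, ddl, le', if_neg h]
      rw [ih (some a)]
      split_ifs <;> simp

theorem ddl_ne_nil (l : List Char) (hl : l ≠ []) : ddl none l ≠ [] := by
  cases l with
  | nil => exact absurd rfl hl
  | cons a t => simp [ddl]

-- B's fold computes gstep over the collapsed tail
theorem bfold_eq (l : List Char) :
    ∀ (count : Int) (seen : Bool) (last : Option Char),
    (l.foldl
      (fun (st : Int × Bool × Option Char) (c : Char) =>
        if some c = st.2.2 then st
        else if c = '+' then (st.1, true, some c)
        else if c = '-' then (st.1 + (if st.2.1 then 2 else 1), st.2.1, some c)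
        else (st.1, st.2.1, some c))
      (count, seen, last)).1
    = ((ddl last l).foldl gstep (seen, count)).2 := by
  induction l with
  | nil => intro count seen last; simp [ddl]
  | cons c t ih =>
    intro count seen last
    rw [List.foldl_cons]
    by_cases h : some c = last
    · rw [if_pos h, show ddl last (c :: t) = ddl last t from by simp [ddl, h]]
      exact ih count seen last
    · rw [if_neg h, show ddl last (c :: t) = c :: ddl (some c) t from by simp [ddl, h],
        List.foldl_cons]
      by_cases hp : c = '+'
      · rw [if_pos hp, show gstep (seen, count) c = (true, count) from by simp [gstep, hp]]
        exact ih count true (some c)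
      · by_cases hm : c = '-'
        · rw [if_neg hp, if_pos hm,
            show gstep (seen, count) c = (seen, count + (if seen then 2 else 1)) from by
              simp [gstep, hp, hm]]
          exact ih _ seen (some c)
        · rw [if_neg hp, if_neg hm,
            show gstep (seen, count) c = (seen, count) from by simp [gstep, hp, hm]]
          exact ih count seen (some c)

-- minify's loop invariant: after n ≥ 1 steps the state is the collapsed prefix with its last index
theorem minify_inv (l : List Char) :
    ∀ (n : Nat), 1 ≤ n → n ≤ l.length →
    ((List.range n).foldl
      (fun (st : List Char × Int) (i : Nat) =>
        if PySem.List.pyGet? l (i : Int) = PySem.List.pyGet? st.1 st.2 then st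
        else (st.1 ++ (PySem.List.pyGet? l (i : Int)).toList, st.2 + 1))
      ((PySem.List.pyGet? l 0).toList, 0))
    = (ddl none (l.take n), ((ddl none (l.take n)).length : Int) - 1) := by
  intro n
  induction n with
  | zero => intro h; omega
  | succ n ih =>
    intro _ hle
    by_cases hn : n = 0
    · subst hn
      cases l with
      | nil => simp at hle
      | cons a t =>
        simp [List.range_succ, ddl]
    · have h1 : 1 ≤ n := by omega
      have h2 : n ≤ l.length := by omega
      have hnl : n < l.length := by omega
      rw [List.range_succ, List.foldl_append, ih h1 h2]
      have htk : l.take n ≠ [] := by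
        intro h; have := congrArg List.length h; simp [Nat.min_eq_left h2] at this; omega
      have hdn : ddl none (l.take n) ≠ [] := ddl_ne_nil _ htk
      have hlen : 1 ≤ (ddl none (l.take n)).length := by
        cases hdd : ddl none (l.take n) with
        | nil => exact absurd hdd hdn
        | cons x xs => simp
      have hcast : ((ddl none (l.take n)).length : Int) - 1
          = (((ddl none (l.take n)).length - 1 : Nat) : Int) := by omega
      have hget : PySem.List.pyGet? (ddl none (l.take n)) (((ddl none (l.take n)).length : Int) - 1)
          = le' none (l.take n) := by
        rw [← getLast?_ddl _ _ hdn, List.getLast?_eq_getElem?, hcast, PySem.List.pyGet?_natCast]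
      have htake : l.take (n + 1) = l.take n ++ [l[n]] := by
        rw [List.take_succ]
        simp [List.getElem?_eq_getElem hnl]
      simp only [List.foldl_cons, List.foldl_nil]
      rw [PySem.List.pyGet?_natCast, List.getElem?_eq_getElem hnl, hget, htake, ddl_snoc]
      by_cases hc : some l[n] = le' none (l.take n)
      · simp only [if_pos hc]
      · simp only [if_neg hc, Option.toList_some, Prod.mk.injEq, List.length_append,
          List.length_cons, List.length_nil]
        exact ⟨by trivial, by push_cast; ring⟩

theorem pyMinify_eq (l : List Char) (hl : l ≠ []) : pyMinify l = ddl none l := by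
  unfold pyMinify
  rw [minify_inv l l.length
    (by cases l with | nil => exact absurd rfl hl | cons a t => simp) (le_refl _)]
  simp

-- A's main loop invariant: prev ≠ -1 iff a '+' run was seen, and then m[prev] = '+'
theorem afold_inv (m : List Char) :
    ∀ (n : Nat), n ≤ m.length →
    (afold m n).2 = (gfold m n).2
    ∧ (if (gfold m n).1
       then 0 ≤ (afold m n).1 ∧ (afold m n).1 < (n : Int)
            ∧ PySem.List.pyGet? m (afold m n).1 = some '+'
       else (afold m n).1 = -1) := by
  intro n
  induction n with
  | zero => simp [afold, gfold]
  | succ n ih =>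
    intro hle
    have hnl : n < m.length := by omega
    obtain ⟨ihc, ihp⟩ := ih (by omega)
    have htake : m.take (n + 1) = m.take n ++ [m[n]] := by
      rw [List.take_succ]; simp [List.getElem?_eq_getElem hnl]
    have hstep : afold m (n + 1) = astep m (afold m n) n := by
      unfold afold
      rw [List.range_succ, List.foldl_append, List.foldl_cons, List.foldl_nil]
    have hgstep : gfold m (n + 1) = gstep (gfold m n) m[n] := by
      unfold gfold
      rw [htake, List.foldl_append, List.foldl_cons, List.foldl_nil]
    have hmn : PySem.List.pyGet? m ((n : Nat) : Int) = some m[n] := by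
      rw [PySem.List.pyGet?_natCast, List.getElem?_eq_getElem hnl]
    rw [hstep, hgstep]
    unfold astep
    rw [hmn]
    by_cases hp : m[n] = '+'
    · have hg : gstep (gfold m n) m[n] = (true, (gfold m n).2) := by simp [gstep, hp]
      rw [if_pos (by rw [hp]), hg]
      refine ⟨ihc, ?_⟩
      simp only [if_pos rfl]
      exact ⟨by exact_mod_cast Nat.zero_le n, by push_cast; omega, by rw [hmn, hp]⟩
    · by_cases hm : m[n] = '-'
      · have hg : gstep (gfold m n) m[n]
            = ((gfold m n).1, (gfold m n).2 + (if (gfold m n).1 then 2 else 1)) := by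
          simp [gstep, hp, hm]
        rw [if_neg (fun hcon => hp (Option.some.inj hcon)), if_pos (by rw [hm]), hg]
        by_cases hseen : (gfold m n).1 = true
        · rw [if_pos hseen] at ihp
          obtain ⟨h0, hlt, hplus⟩ := ihp
          have hne : (afold m n).1 ≠ -1 := by omega
          rw [if_pos hne, if_pos hplus]
          refine ⟨by simp [hseen, ihc], ?_⟩
          simp only [hseen, if_pos rfl]
          exact ⟨h0, by push_cast; omega, hplus⟩
        · rw [if_neg hseen] at ihp
          rw [if_neg (not_not_intro ihp)]
          have hseen' : (gfold m n).1 = false := by simpa using hseen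
          refine ⟨by simp [hseen', ihc], ?_⟩
          simp only [hseen', Bool.false_eq_true, if_false]
          exact ihp
      · have hg : gstep (gfold m n) m[n] = gfold m n := by simp [gstep, hp, hm]
        rw [if_neg (fun hcon => hp (Option.some.inj hcon)),
          if_neg (fun hcon => hm (Option.some.inj hcon)), hg]
        refine ⟨ihc, ?_⟩
        by_cases hseen : (gfold m n).1 = true
        · rw [if_pos hseen] at ihp ⊢
          exact ⟨ihp.1, by push_cast; omega, ihp.2.2⟩
        · rw [if_neg hseen] at ihp ⊢
          exact ihp

-- ===== VERDICT (by name: the statement is the Claim_ definition above) =====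
theorem solve_spec : Claim_equal_solve := by
  intro s _ hpre
  have hl : s.toList ≠ [] := by
    intro h; apply hpre; exact String.ext (by simp [h])
  unfold Spec_solve solve solve_alt
  rw [bfold_eq]
  refine congrArg PySem.Int.toStr ?_
  calc ((List.range (pyMinify s.toList).length).foldl
          (fun (st : Int × Int) (i : Nat) =>
            if PySem.List.pyGet? (pyMinify s.toList) (i : Int) = some '+' then ((i : Int), st.2)
            else if PySem.List.pyGet? (pyMinify s.toList) (i : Int) = some '-' then
              (if st.1 ≠ -1 then
                (if PySem.List.pyGet? (pyMinify s.toList) st.1 = some '+' then (st.1, st.2 + 2) else st)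
               else (st.1, st.2 + 1))
            else st)
          ((-1 : Int), (0 : Int))).2
      = (afold (pyMinify s.toList) (pyMinify s.toList).length).2 := rfl
    _ = (gfold (pyMinify s.toList) (pyMinify s.toList).length).2 :=
        (afold_inv (pyMinify s.toList) (pyMinify s.toList).length (le_refl _)).1
    _ = ((ddl none s.toList).foldl gstep (false, 0)).2 := by
        unfold gfold
        rw [List.take_length, pyMinify_eq s.toList hl]
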